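-- pv_equiv track=rewrite | github.com/bjoheimer/AoC | AoC24/1.py | get_similarity_score
-- ===== SOURCE A (Python) =====
-- def get_similarity_score(l1: list[int], l2: list[int]) -> int:
--     score = 0
--     for i in range(len(l1)):
--         num = l1[i]
--         for j in range(len(l2)):
--             if l2[j] == num:
--                 score += num
--     return score
-- ===== SOURCE B (Python) =====
-- def get_similarity_score(l1: list[int], l2: list[int]) -> int:
--     counts = {}
--     for num in l2:
--         counts[num] = counts.get(num, 0) + 1
--     return sum(num * counts.get(num, 0) for num in l1)
-- ===== Notes on version B (the rewrite author's own statement) =====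
-- stated objective: faster
-- what changed: Replaced the nested rescan of l2 for every element of l1 by a count dictionary built once over l2 and a single weighted pass over l1.
import Mathlib
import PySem

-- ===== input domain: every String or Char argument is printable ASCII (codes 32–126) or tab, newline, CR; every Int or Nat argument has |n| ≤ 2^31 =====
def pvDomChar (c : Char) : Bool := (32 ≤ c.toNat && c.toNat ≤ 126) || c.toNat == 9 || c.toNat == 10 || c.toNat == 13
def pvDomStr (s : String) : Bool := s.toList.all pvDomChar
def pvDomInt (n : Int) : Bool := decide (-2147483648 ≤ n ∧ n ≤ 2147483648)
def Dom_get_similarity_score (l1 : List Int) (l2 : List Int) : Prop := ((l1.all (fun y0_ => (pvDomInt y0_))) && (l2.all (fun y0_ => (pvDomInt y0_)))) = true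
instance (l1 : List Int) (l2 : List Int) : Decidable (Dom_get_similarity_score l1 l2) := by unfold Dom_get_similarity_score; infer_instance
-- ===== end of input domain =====

-- B replaces A's nested rescan of l2 with a count dictionary built once and one weighted pass over l1 (asymptotically faster).


-- ===== PORT A =====
def get_similarity_score (l1 : List Int) (l2 : List Int) : Int :=
  (PySem.List.pyRange 0 l1.length 1).foldl (fun score i =>
    let num := PySem.List.pyGetD l1 i 0
    (PySem.List.pyRange 0 l2.length 1).foldl (fun s j =>
      if PySem.List.pyGetD l2 j 0 = num then s + num else s) score) 0

-- ===== PORT B =====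
def get_similarity_score_alt (l1 : List Int) (l2 : List Int) : Int :=
  let counts := l2.foldl (fun d x => d.insert x (d.getD x 0 + 1)) (PySem.Dict.empty : PySem.Dict Int Int)
  (l1.map (fun num => num * counts.getD num 0)).sum

-- ===== PRECONDITION & SPEC =====
def Spec_get_similarity_score (l1 : List Int) (l2 : List Int) (out : Int) : Prop := out = get_similarity_score_alt l1 l2
instance (l1 : List Int) (l2 : List Int) (out : Int) : Decidable (Spec_get_similarity_score l1 l2 out) := by unfold Spec_get_similarity_score; infer_instance

-- ===== CLAIM (what is proved, stated in full; the proofs are below) =====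
def Claim_equal_get_similarity_score : Prop := ∀ (l1 : List Int) (l2 : List Int), Dom_get_similarity_score l1 l2 → Spec_get_similarity_score l1 l2 (get_similarity_score l1 l2)

-- ===== LEMMAS AND PROOFS =====

-- A's inner loop over l2 adds num once per occurrence of num in l2.
theorem inner_loop_count (l2 : List Int) (num s : Int) :
    l2.foldl (fun s x => if x = num then s + num else s) s
      = s + num * (l2.count num : Int) := by
  induction l2 generalizing s with
  | nil => simp
  | cons x xs ih =>
    by_cases h : x = num <;> simp [h, ih] <;> ring

-- A's outer loop equals the weighted sum over l1.
theorem outer_loop_sum (l2 : List Int) (l1 : List Int) (s : Int) :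
    l1.foldl (fun score num => score + num * (l2.count num : Int)) s
      = s + (l1.map (fun num => num * (l2.count num : Int))).sum := by
  induction l1 generalizing s with
  | nil => simp
  | cons x xs ih => simp [ih]; ring

-- ===== VERDICT (by name: the statement is the Claim_ definition above) =====
theorem get_similarity_score_spec : Claim_equal_get_similarity_score := by
  intro l1 l2 _
  show get_similarity_score l1 l2 = get_similarity_score_alt l1 l2
  have hB : get_similarity_score_alt l1 l2
      = (l1.map (fun num => num * (l2.count num : Int))).sum := by
    unfold get_similarity_score_alt
    simp only [PySem.Dict.foldl_insert_getD_add_one_eq_counter, PySem.Dict.getD_counter]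
  rw [hB]
  calc get_similarity_score l1 l2
      = l1.foldl (fun score num =>
          List.foldl (fun s j => if PySem.List.pyGetD l2 j 0 = num then s + num else s)
            score (PySem.List.pyRange 0 (l2.length : Int) 1)) 0 :=
        PySem.List.foldl_pyRange_zero_pyGetD' l1 0
          (fun score num =>
            List.foldl (fun s j => if PySem.List.pyGetD l2 j 0 = num then s + num else s)
              score (PySem.List.pyRange 0 (l2.length : Int) 1)) 0
    _ = l1.foldl (fun score num => score + num * (l2.count num : Int)) 0 := by
        congr 1
        funext score num
        exact (PySem.List.foldl_pyRange_zero_pyGetD' l2 0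
          (fun s x => if x = num then s + num else s) score).trans
          (inner_loop_count l2 num score)
    _ = (l1.map (fun num => num * (l2.count num : Int))).sum := by
        rw [outer_loop_sum]; ring
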